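-- pv_equiv track=rewrite | github.com/mgritter/soffit | soffit/graph.py | surjectiveMappings
-- ===== SOURCE A (Python) =====
-- def surjectiveMappings( k, values, optional=[] ):
--     """Enumerate all the ways to select k distinct items from 'values' such that
--     all values appear at least once."""
--     if k < len( values ):
--         return
--     elif k == 1:
--         if len( values ) == 1:
--             yield (values[0],)
--         else:
--             for o in optional:
--                 yield (o,)
--
--     # Pick a must-use, it becomes optional
--     for i in range(len(values)):
--         selected = values[i]
--         for m in surjectiveMappings( k-1,
--                                      values[:i] + values[i+1:],
--                                      optional + [selected] ):
--             yield (selected,) + m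
--
--     # Pick a may-use
--     for selected in optional:
--         for m in surjectiveMappings( k-1,
--                                      values,
--                                      optional ):
--             yield (selected,) + m
-- ===== SOURCE B (Python) =====
-- # B: iterative depth-first traversal with an explicit stack of frames that carry
-- # the accumulated prefix top-down, replacing A's nested generator recursion that
-- # prepends the selection to each recursively yielded suffix.
-- def surjectiveMappings(k, values, optional=[]):
--     stack = [((), k, list(values), list(optional))]
--     while stack:
--         prefix, kk, vals, opts = stack.pop()
--         if kk < len(vals):
--             continue
--         if kk == 1:
--             if len(vals) == 1:
--                 yield prefix + (vals[0],)
--             else: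
--                 for o in opts:
--                     yield prefix + (o,)
--         children = [(prefix + (v,), kk - 1, vals[:i] + vals[i + 1:], opts + [v])
--                     for i, v in enumerate(vals)]
--         children += [(prefix + (o,), kk - 1, vals, opts) for o in opts]
--         stack.extend(reversed(children))
-- ===== Notes on version B (the rewrite author's own statement) =====
-- stated objective: alternative
-- what changed: B replaces A's nested generator recursion (which prepends the selected element to every suffix yielded by a recursive call) with an iterative depth-first worklist: an explicit stack of (prefix, k, values, optional) frames that carry the accumulated prefix top-down and emit complete tuples at the k==1 base frames.
import Mathlib
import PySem

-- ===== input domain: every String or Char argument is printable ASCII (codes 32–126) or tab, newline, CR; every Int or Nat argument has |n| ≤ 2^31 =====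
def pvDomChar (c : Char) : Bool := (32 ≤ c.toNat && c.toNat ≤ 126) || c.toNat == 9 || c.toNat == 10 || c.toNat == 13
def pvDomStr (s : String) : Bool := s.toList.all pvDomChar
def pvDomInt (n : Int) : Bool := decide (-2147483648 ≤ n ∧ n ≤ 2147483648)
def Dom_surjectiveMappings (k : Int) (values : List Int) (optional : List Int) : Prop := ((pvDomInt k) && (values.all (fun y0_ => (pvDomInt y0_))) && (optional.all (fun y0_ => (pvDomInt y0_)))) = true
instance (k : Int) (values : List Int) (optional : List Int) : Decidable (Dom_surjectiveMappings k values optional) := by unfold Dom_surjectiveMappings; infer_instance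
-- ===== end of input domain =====

-- B replaces the nested generator recursion with an explicit-stack depth-first
-- iteration that carries the accumulated prefix top-down (same cost class).

-- ===== PORT A =====
-- Generator ported as the list of its yields, in yield order; the recursion is made
-- structural with a fuel of (k+1).toNat, which is a pure totality device: each call
-- decrements k by 1, and at fuel 0 we have k ≤ -1 < len(values), so [] either way.
-- values[i] with i drawn from range(len(values)) is always in range, so pyGetD is exact.
def pvGoA : Nat → Int → List Int → List Int → List (List Int)
  | 0, _, _, _ => []
  | Nat.succ n, k, values, optional =>
    if k < (values.length : Int) then []
    else
      (if k = 1 then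
         (if values.length = 1 then [[PySem.List.pyGetD values 0 0]]
          else optional.map (fun o => [o]))
       else [])
      ++
      -- Pick a must-use, it becomes optional
      (PySem.List.pyRange 0 (values.length : Int) 1).flatMap (fun i =>
        let selected := PySem.List.pyGetD values i 0
        (pvGoA n (k - 1)
            (PySem.List.slice values none (some i) ++ PySem.List.slice values (some (i + 1)) none)
            (optional ++ [selected])).map (fun m => selected :: m))
      ++
      -- Pick a may-use
      optional.flatMap (fun selected =>
        (pvGoA n (k - 1) values optional).map (fun m => selected :: m))

def surjectiveMappings (k : Int) (values : List Int) (optional : List Int) : List (List Int) :=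
  pvGoA (k + 1).toNat k values optional

-- ===== PORT B =====
-- The while-loop over the explicit stack of (prefix, k, vals, opts) frames; the head
-- of the Lean list is the top of the Python stack (stack.pop / extend(reversed(..))),
-- so popping takes the head and the children are pushed in order in front of the rest.
-- The loop is made total with a fuel that counts loop iterations (pvFuelB below);
-- fuel exhaustion is unreachable and is proven away in the lemmas.
def pvLoopB : Nat → List (List Int × Int × List Int × List Int) → List (List Int)
  | _, [] => []
  | 0, _ :: _ => []
  | Nat.succ f, (pre, kk, vals, opts) :: rest =>
    if kk < (vals.length : Int) then pvLoopB f rest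
    else
      (if kk = 1 then
         (if vals.length = 1 then [pre ++ [PySem.List.pyGetD vals 0 0]]
          else opts.map (fun o => pre ++ [o]))
       else [])
      ++
      pvLoopB f
        (((PySem.List.enumerate vals 0).map (fun iv =>
            (pre ++ [iv.2], kk - 1,
             PySem.List.slice vals none (some iv.1) ++ PySem.List.slice vals (some (iv.1 + 1)) none,
             opts ++ [iv.2])))
         ++ (opts.map (fun o => (pre ++ [o], kk - 1, vals, opts)))
         ++ rest)

-- Exact number of loop iterations spent on the subtree rooted at a frame (fuel bound).
def pvFuelB : Nat → Int → List Int → List Int → Nat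
  | 0, _, _, _ => 1
  | Nat.succ n, k, vals, opts =>
    if k < (vals.length : Int) then 1
    else 1 +
      ((PySem.List.enumerate vals 0).map (fun iv =>
          pvFuelB n (k - 1)
            (PySem.List.slice vals none (some iv.1) ++ PySem.List.slice vals (some (iv.1 + 1)) none)
            (opts ++ [iv.2]))).sum
      + opts.length * pvFuelB n (k - 1) vals opts

def surjectiveMappings_alt (k : Int) (values : List Int) (optional : List Int) : List (List Int) :=
  pvLoopB (pvFuelB (k + 1).toNat k values optional) [([], k, values, optional)]

-- ===== PRECONDITION & SPEC =====
-- A recurses with depth about k whenever that recursion is reached; Pre_ excludes the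
-- inputs with k > 1000 (and a reachable recursion) where consuming A's generator
-- overruns CPython's recursion limit and raises RecursionError.
def Pre_surjectiveMappings (k : Int) (values : List Int) (optional : List Int) : Prop :=
  k < (values.length : Int) ∨ (values = [] ∧ optional = []) ∨ k ≤ 1000
instance (k : Int) (values : List Int) (optional : List Int) : Decidable (Pre_surjectiveMappings k values optional) := by unfold Pre_surjectiveMappings; infer_instance
def pvWitness_surjectiveMappings : Int × List Int × List Int := (3, [1, 2], [5])

def Spec_surjectiveMappings (k : Int) (values : List Int) (optional : List Int) (out : List (List Int)) : Prop := out = surjectiveMappings_alt k values optional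
instance (k : Int) (values : List Int) (optional : List Int) (out : List (List Int)) : Decidable (Spec_surjectiveMappings k values optional out) := by unfold Spec_surjectiveMappings; infer_instance

-- ===== CLAIM (what is proved, stated in full; the proofs are below) =====
def Claim_equal_surjectiveMappings : Prop := ∀ (k : Int) (values : List Int) (optional : List Int), Dom_surjectiveMappings k values optional → Pre_surjectiveMappings k values optional → Spec_surjectiveMappings k values optional (surjectiveMappings k values optional)

-- ===== LEMMAS AND PROOFS =====

-- What one stack frame contributes to B's output: A's result for its (k, vals, opts),
-- each tuple prefixed by the frame's accumulated prefix.
def pvEmit (fr : List Int × Int × List Int × List Int) : List (List Int) :=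
  (pvGoA (fr.2.1 + 1).toNat fr.2.1 fr.2.2.1 fr.2.2.2).map (fr.1 ++ ·)

def pvCostF (fr : List Int × Int × List Int × List Int) : Nat :=
  pvFuelB (fr.2.1 + 1).toNat fr.2.1 fr.2.2.1 fr.2.2.2

lemma pv_sum_const (l : List Int) (c : Nat) : (l.map fun _ => c).sum = l.length * c := by
  induction l with
  | nil => simp
  | cons x t ih => simp [ih]; ring

lemma pvFuelB_pos (n : Nat) (k : Int) (vals opts : List Int) : 1 ≤ pvFuelB n k vals opts := by
  cases n with
  | zero => simp [pvFuelB]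
  | succ n => rw [pvFuelB]; split <;> omega

lemma pvGoA_skip (n : Nat) (k : Int) (vals opts : List Int) (h : k < (vals.length : Int)) :
    pvGoA n k vals opts = [] := by
  cases n with
  | zero => rfl
  | succ n => rw [pvGoA]; simp [h]

lemma pvLoop_main : ∀ (f : Nat) (s : List (List Int × Int × List Int × List Int)),
    (s.map pvCostF).sum ≤ f → pvLoopB f s = s.flatMap pvEmit := by
  intro f
  induction f with
  | zero =>
    intro s hs
    cases s with
    | nil => rfl
    | cons fr rest =>
      exfalso
      have h1 := pvFuelB_pos (fr.2.1 + 1).toNat fr.2.1 fr.2.2.1 fr.2.2.2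
      simp [pvCostF] at hs
      omega
  | succ f ih =>
    intro s hs
    cases s with
    | nil => rfl
    | cons fr rest =>
      obtain ⟨pre, kk, vals, opts⟩ := fr
      have hc : pvCostF (pre, kk, vals, opts) + (rest.map pvCostF).sum ≤ f + 1 := by
        simpa using hs
      by_cases hk : kk < (vals.length : Int)
      · have hrest : (rest.map pvCostF).sum ≤ f := by
          have := pvFuelB_pos (kk + 1).toNat kk vals opts
          simp [pvCostF] at hc; omega
        rw [pvLoopB]
        simp only [hk, if_true]
        rw [ih rest hrest, List.flatMap_cons]
        simp [pvEmit, pvGoA_skip _ _ _ _ hk]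
      · -- kk ≥ len(vals) ≥ 0
        have hk0 : 0 ≤ kk := le_trans (Int.natCast_nonneg vals.length) (not_lt.mp hk)
        have hfuel : (kk + 1).toNat = kk.toNat + 1 := by omega
        have hfuel' : (kk - 1 + 1).toNat = kk.toNat := by omega
        -- children of this frame
        set must : List (List Int × Int × List Int × List Int) :=
          (PySem.List.enumerate vals 0).map (fun iv =>
            (pre ++ [iv.2], kk - 1,
             PySem.List.slice vals none (some iv.1) ++ PySem.List.slice vals (some (iv.1 + 1)) none,
             opts ++ [iv.2])) with hmust
        set may : List (List Int × Int × List Int × List Int) :=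
          opts.map (fun o => (pre ++ [o], kk - 1, vals, opts)) with hmay
        have hcost : pvCostF (pre, kk, vals, opts)
            = 1 + (must.map pvCostF).sum + (may.map pvCostF).sum := by
          simp only [pvCostF, hfuel]
          rw [pvFuelB]
          simp only [hk, if_false]
          congr 1
          · congr 1
            simp [hmust, List.map_map, Function.comp_def, pvCostF]
          · simp only [hmay, List.map_map, Function.comp_def, pvCostF, hfuel']
            rw [pv_sum_const]
        have hrec : ((must ++ may ++ rest).map pvCostF).sum ≤ f := by
          simp only [List.map_append, List.sum_append]
          omega
        rw [pvLoopB]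
        simp only [hk, if_false]
        rw [ih _ hrec]
        -- now compute pvEmit of the popped frame
        have hemit : pvEmit (pre, kk, vals, opts)
            = (if kk = 1 then
                 (if vals.length = 1 then [pre ++ [PySem.List.pyGetD vals 0 0]]
                  else opts.map (fun o => pre ++ [o]))
               else [])
              ++ must.flatMap pvEmit ++ may.flatMap pvEmit := by
          simp only [pvEmit, hfuel]
          rw [pvGoA]
          simp only [hk, if_false]
          rw [PySem.List.enumerate_eq_map_pyRange vals (0 : Int)] at hmust
          simp only [List.map_append]
          congr 1
          · congr 1
            · -- base part
              split_ifs <;> simp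
            · -- must part
              rw [hmust, List.map_map, List.flatMap_map]
              simp [pvEmit, List.map_flatMap, List.map_map, Function.comp_def, hfuel']
          · -- may part
            rw [hmay, List.flatMap_map]
            simp [pvEmit, List.map_flatMap, List.map_map, Function.comp_def, hfuel']
        rw [List.flatMap_cons, hemit]
        simp [List.flatMap_append, List.append_assoc]

-- ===== VERDICT (by name: the statement is the Claim_ definition above) =====
theorem surjectiveMappings_spec : Claim_equal_surjectiveMappings := by
  intro k values optional _hdom _hpre
  unfold Spec_surjectiveMappings surjectiveMappings surjectiveMappings_alt
  rw [pvLoop_main (pvFuelB (k + 1).toNat k values optional) [([], k, values, optional)]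
      (by simp [pvCostF])]
  simp [pvEmit]
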